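-- pv_equiv track=rewrite | github.com/Mcps4/ifpi-ads-algoritmos2020 | EXERCICIOS_RACKERRANK/SHERLOCK.PY | anagramas
-- ===== SOURCE A (Python) =====
-- def anagramas(s):
--     ac = 0
--     for i in range(0, len(s), 1):
--         for j in range (i+1, len(s), 1):
--             if palavra_1_letra(s)[i] == palavra_1_letra(s)[j]:
--                 ac += 1
--
--     for i in range(0, len(s)-1, 1):
--         for j in range (i+1, len(s)-1, 1):
--             if palavras__2_letras(s)[i] == palavras__2_letras(s)[j]:
--                ac += 1
--
--     for i in range(0, len(s)-2, 1):
--         for j in range (i+1, len(s)-2, 1):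
--             if palavra_3_letras(s)[i] == palavra_3_letras(s)[j]:
--                ac += 1
--     return ac
--
-- def palavra_1_letra(s):
--     letras = []
--     for i in s:
--         letras.append(i)
--     return letras
--
-- def palavras__2_letras(s):
--     letras_2 = []
--     for i in range(0, len(s)-1, 1):
--         letras_2.append(ord(s[i])+ord(s[i+1]))
--     return letras_2
--
-- def palavra_3_letras(s):
--     letras_3 = []
--     for i in range(0, len(s)-2, 1):
--         letras_3.append(ord(s[i])+ord(s[i+1])+ord(s[i+2]))
--     return letras_3
-- ===== SOURCE B (Python) =====
-- def anagramas(s):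
--     # same three hash arrays as A: chars, adjacent ord-sums, triple ord-sums;
--     # equal pairs counted by sorting each array and sweeping runs of equal values
--     ac = 0
--     for arr in (
--         [ord(c) for c in s],
--         [ord(s[i]) + ord(s[i + 1]) for i in range(len(s) - 1)],
--         [ord(s[i]) + ord(s[i + 1]) + ord(s[i + 2]) for i in range(len(s) - 2)],
--     ):
--         t = sorted(arr)
--         run = 0
--         for prev, cur in zip(t, t[1:]):
--             if cur == prev:
--                 run += 1
--                 ac += run
--             else:
--                 run = 0
--     return ac
-- ===== Notes on version B (the rewrite author's own statement) =====
-- stated objective: faster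
-- what changed: Replaces A's three O(n^2) nested index scans (each of which rebuilds the hash array at every comparison) by building each of the three hash arrays once, sorting it, and counting equal pairs in a single run-length sweep over the sorted copy.
import Mathlib
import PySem

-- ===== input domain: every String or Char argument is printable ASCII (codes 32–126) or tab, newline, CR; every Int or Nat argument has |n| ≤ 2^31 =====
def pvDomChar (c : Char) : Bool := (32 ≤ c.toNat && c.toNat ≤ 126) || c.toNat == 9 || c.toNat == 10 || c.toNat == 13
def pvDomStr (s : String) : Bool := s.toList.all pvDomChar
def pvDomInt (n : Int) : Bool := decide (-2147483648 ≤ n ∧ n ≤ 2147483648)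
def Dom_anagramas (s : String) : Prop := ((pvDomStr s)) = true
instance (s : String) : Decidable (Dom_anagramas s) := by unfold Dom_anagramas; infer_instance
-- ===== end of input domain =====

-- B replaces A's three quadratic nested index scans by sort-then-sweep runs of equal
-- values over the same three hash arrays (alternative decomposition).

-- ===== PORT A =====
def palavra1 (cs : List Char) : List Char :=
  cs.foldl (fun acc c => acc ++ [c]) []

def palavras2 (cs : List Char) : List Int :=
  (PySem.List.pyRange 0 ((cs.length : Int) - 1) 1).foldl
    (fun acc i => acc ++ [((PySem.List.pyGetD cs i ' ').toNat : Int)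
                          + ((PySem.List.pyGetD cs (i + 1) ' ').toNat : Int)]) []

def palavra3 (cs : List Char) : List Int :=
  (PySem.List.pyRange 0 ((cs.length : Int) - 2) 1).foldl
    (fun acc i => acc ++ [((PySem.List.pyGetD cs i ' ').toNat : Int)
                          + ((PySem.List.pyGetD cs (i + 1) ' ').toNat : Int)
                          + ((PySem.List.pyGetD cs (i + 2) ' ').toNat : Int)]) []

def anagramas (s : String) : Int :=
  let cs := s.toList
  let n : Int := cs.length
  let ac1 : Int :=
    (PySem.List.pyRange 0 n 1).foldl (fun ac i =>
      (PySem.List.pyRange (i + 1) n 1).foldl (fun ac j =>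
        if PySem.List.pyGetD (palavra1 cs) i ' ' = PySem.List.pyGetD (palavra1 cs) j ' '
        then ac + 1 else ac) ac) 0
  let ac2 : Int :=
    (PySem.List.pyRange 0 (n - 1) 1).foldl (fun ac i =>
      (PySem.List.pyRange (i + 1) (n - 1) 1).foldl (fun ac j =>
        if PySem.List.pyGetD (palavras2 cs) i 0 = PySem.List.pyGetD (palavras2 cs) j 0
        then ac + 1 else ac) ac) ac1
  (PySem.List.pyRange 0 (n - 2) 1).foldl (fun ac i =>
    (PySem.List.pyRange (i + 1) (n - 2) 1).foldl (fun ac j =>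
      if PySem.List.pyGetD (palavra3 cs) i 0 = PySem.List.pyGetD (palavra3 cs) j 0
      then ac + 1 else ac) ac) ac2

-- ===== PORT B =====
-- the 'for prev, cur in zip(t, t[1:])' sweep of one sorted array, state = (run, ac)
def sweepB (t : List Int) (ac : Int) : Int :=
  ((t.zip (t.drop 1)).foldl
    (fun st p => if p.2 = p.1 then (st.1 + 1, st.2 + st.1 + 1) else (0, st.2))
    (0, ac)).2

def anagramas_alt (s : String) : Int :=
  let cs := s.toList
  let arr1 : List Int := cs.map (fun c => (c.toNat : Int))
  let arr2 : List Int :=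
    (PySem.List.pyRange 0 ((cs.length : Int) - 1) 1).map
      (fun i => ((PySem.List.pyGetD cs i ' ').toNat : Int)
                + ((PySem.List.pyGetD cs (i + 1) ' ').toNat : Int))
  let arr3 : List Int :=
    (PySem.List.pyRange 0 ((cs.length : Int) - 2) 1).map
      (fun i => ((PySem.List.pyGetD cs i ' ').toNat : Int)
                + ((PySem.List.pyGetD cs (i + 1) ' ').toNat : Int)
                + ((PySem.List.pyGetD cs (i + 2) ' ').toNat : Int))
  let ac1 := sweepB (PySem.List.sorted arr1 (fun x => x) false) 0
  let ac2 := sweepB (PySem.List.sorted arr2 (fun x => x) false) ac1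
  sweepB (PySem.List.sorted arr3 (fun x => x) false) ac2

-- ===== PRECONDITION & SPEC =====
def Spec_anagramas (s : String) (out : Int) : Prop := out = anagramas_alt s
instance (s : String) (out : Int) : Decidable (Spec_anagramas s out) := by unfold Spec_anagramas; infer_instance

-- ===== CLAIM (what is proved, stated in full; the proofs are below) =====
def Claim_equal_anagramas : Prop := ∀ (s : String), Dom_anagramas s → Spec_anagramas s (anagramas s)

-- ===== LEMMAS AND PROOFS =====

-- number of pairs i < j with l[i] = l[j]
def pc {α : Type} [DecidableEq α] : List α → Int
  | [] => 0
  | x :: xs => (xs.count x : Int) + pc xs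

theorem pc_perm {α : Type} [DecidableEq α] {l l' : List α} (h : l.Perm l') :
    pc l = pc l' := by
  induction h with
  | nil => rfl
  | cons x h ih => simp [pc, ih, h.count_eq]
  | swap x y l =>
      by_cases hxy : x = y
      · subst hxy; rfl
      · simp [pc, hxy, Ne.symm hxy]; ring
  | trans h1 h2 ih1 ih2 => exact ih1.trans ih2

theorem pc_map_inj {α β : Type} [DecidableEq α] [DecidableEq β]
    (f : α → β) (hf : Function.Injective f) (l : List α) :
    pc (l.map f) = pc l := by
  induction l with
  | nil => rfl
  | cons x xs ih => simp [pc, ih, List.count_map_of_injective _ f hf]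

-- A's inner+outer index scan over a list computes pc
theorem sum_count_drop {α : Type} [DecidableEq α] (l : List α) (d : α) :
    (((List.range l.length).map
        (fun k => ((l.drop (k + 1)).count (l.getD k d) : Int))).sum) = pc l := by
  induction l with
  | nil => rfl
  | cons x xs ih =>
      rw [List.length_cons, List.range_succ_eq_map]
      simp only [List.map_cons, List.map_map, List.sum_cons]
      have h : ((List.range xs.length).map
          ((fun k => (((x :: xs).drop (k + 1)).count ((x :: xs).getD k d) : Int)) ∘ Nat.succ))
          = (List.range xs.length).map (fun k => ((xs.drop (k + 1)).count (xs.getD k d) : Int)) := by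
        apply List.map_congr_left; intro k _; rfl
      rw [h, ih]
      simp [pc]

theorem loopA {α : Type} [DecidableEq α] (l : List α) (d : α) (a : Int) :
    (PySem.List.pyRange 0 (l.length : Int) 1).foldl (fun ac i =>
      (PySem.List.pyRange (i + 1) (l.length : Int) 1).foldl (fun ac j =>
        if PySem.List.pyGetD l i d = PySem.List.pyGetD l j d then ac + 1 else ac) ac)
      a = a + pc l := by
  have hcongr : (PySem.List.pyRange 0 (l.length : Int) 1).foldl (fun ac i =>
      (PySem.List.pyRange (i + 1) (l.length : Int) 1).foldl (fun ac j =>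
        if PySem.List.pyGetD l i d = PySem.List.pyGetD l j d then ac + 1 else ac) ac) a
      = (PySem.List.pyRange 0 (l.length : Int) 1).foldl (fun ac i =>
          ac + (((l.drop (i + 1).toNat).count (PySem.List.pyGetD l i d) : Int))) a := by
    apply PySem.List.foldl_congr_mem
    intro ac i hi
    have h0 : (0 : Int) ≤ i := ((PySem.List.mem_pyRange_one).1 hi).1
    rw [PySem.List.foldl_pyRange_pyGetD' l d
      (fun ac y => if PySem.List.pyGetD l i d = y then ac + 1 else ac) ac (a := i + 1) (by omega)]
    rw [PySem.List.foldl_ite_add_one]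
    congr 1
    rw [List.count]
    norm_cast
    apply List.countP_congr
    intro y _
    simp only [decide_eq_true_eq, beq_iff_eq]
    exact eq_comm
  rw [hcongr,
    PySem.List.foldl_add (g := fun i => ((l.drop (i + 1).toNat).count (PySem.List.pyGetD l i d) : Int)),
    PySem.List.pyRange_zero_natCast, List.map_map]
  have h2 : ((List.range l.length).map
      ((fun i => ((l.drop (i + 1).toNat).count (PySem.List.pyGetD l i d) : Int)) ∘ (fun k : Nat => (k : Int))))
      = (List.range l.length).map (fun k => ((l.drop (k + 1)).count (l.getD k d) : Int)) := by
    apply List.map_congr_left; intro k _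
    simp only [Function.comp_apply, PySem.List.pyGetD_natCast]
    norm_num
  rw [h2, sum_count_drop]

-- pyRange a b 1 with the bound replaced by its clamped Nat, for 0 ≤ a
theorem pyRange_toNat_bound (a : Int) (b : Int) (hb : 0 ≤ a) :
    PySem.List.pyRange a b 1 = PySem.List.pyRange a ((b.toNat : Nat) : Int) 1 := by
  by_cases h : 0 ≤ b
  · rw [Int.toNat_of_nonneg h]
  · rw [PySem.List.pyRange_one_eq_nil (by omega), PySem.List.pyRange_one_eq_nil (by omega)]

-- A's nested scan with an arbitrary Int bound whose clamp is the list's length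
theorem loopA_gen {α : Type} [DecidableEq α] (l : List α) (d : α) (b a : Int)
    (hb : b.toNat = l.length) :
    (PySem.List.pyRange 0 b 1).foldl (fun ac i =>
      (PySem.List.pyRange (i + 1) b 1).foldl (fun ac j =>
        if PySem.List.pyGetD l i d = PySem.List.pyGetD l j d then ac + 1 else ac) ac)
      a = a + pc l := by
  rw [pyRange_toNat_bound 0 b le_rfl, hb]
  have hcongr : (PySem.List.pyRange 0 (l.length : Int) 1).foldl (fun ac i =>
      (PySem.List.pyRange (i + 1) b 1).foldl (fun ac j =>
        if PySem.List.pyGetD l i d = PySem.List.pyGetD l j d then ac + 1 else ac) ac) a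
      = (PySem.List.pyRange 0 (l.length : Int) 1).foldl (fun ac i =>
          (PySem.List.pyRange (i + 1) (l.length : Int) 1).foldl (fun ac j =>
            if PySem.List.pyGetD l i d = PySem.List.pyGetD l j d then ac + 1 else ac) ac) a := by
    apply PySem.List.foldl_congr_mem
    intro ac i hi
    have h0 : (0 : Int) ≤ i := ((PySem.List.mem_pyRange_one).1 hi).1
    rw [pyRange_toNat_bound (i + 1) b (by omega), hb]
  rw [hcongr, loopA]

-- B's sweep of a sorted list: zip-fold invariant
theorem sweep_go_sorted : ∀ (xs : List Int) (x : Int) (r ac : Int),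
    (x :: xs).Pairwise (· ≤ ·) →
    (((x :: xs).zip xs).foldl
      (fun st p => if p.2 = p.1 then (st.1 + 1, st.2 + st.1 + 1) else (0, st.2))
      (r, ac)).2 = ac + pc (x :: xs) + r * (xs.count x : Int) := by
  intro xs
  induction xs with
  | nil => intro x r ac _; simp [pc]
  | cons y rest ih =>
      intro x r ac hp
      by_cases hxy : y = x
      · subst hxy
        simp only [List.zip_cons_cons, List.foldl_cons]
        rw [if_pos trivial, ih y (r + 1) (ac + r + 1) (hp.sublist (List.sublist_cons_self _ _))]
        simp [pc]
        ring
      · simp only [List.zip_cons_cons, List.foldl_cons]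
        rw [if_neg hxy, ih y 0 ac (hp.sublist (List.sublist_cons_self _ _))]
        have hx0 : (y :: rest).count x = 0 := by
          rw [List.count_eq_zero]
          intro hmem
          rw [List.pairwise_cons] at hp
          rcases hp with ⟨hall, hp2⟩
          rw [List.pairwise_cons] at hp2
          rcases hp2 with ⟨hall2, _⟩
          rcases List.mem_cons.1 hmem with h | h
          · exact hxy h.symm
          · have h1 : x ≤ y := hall y (List.mem_cons_self ..)
            have h2 : y ≤ x := le_of_le_of_eq (hall2 x h) rfl
            exact hxy (le_antisymm h2 h1)
        simp [pc, hx0]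

theorem sweepB_eq_pc (t : List Int) (ac : Int) (hp : t.Pairwise (· ≤ ·)) :
    sweepB t ac = ac + pc t := by
  cases t with
  | nil => simp [sweepB, pc]
  | cons x xs =>
      unfold sweepB
      simp only [List.drop_succ_cons, List.drop_zero]
      rw [sweep_go_sorted xs x 0 ac hp]
      ring

theorem sweepB_sorted_eq_pc (arr : List Int) (ac : Int) :
    sweepB (PySem.List.sorted arr (fun x => x) false) ac = ac + pc arr := by
  rw [sweepB_eq_pc _ _ (PySem.List.sorted_pairwise arr (fun x => x))]
  rw [pc_perm (PySem.List.sorted_perm arr (fun x => x) false)]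

-- the A-side built lists
theorem palavra1_eq (cs : List Char) : palavra1 cs = cs := by
  unfold palavra1
  rw [PySem.List.foldl_append_singleton_eq_self]
  simp

theorem palavras2_eq (cs : List Char) :
    palavras2 cs = (PySem.List.pyRange 0 ((cs.length : Int) - 1) 1).map
      (fun i => ((PySem.List.pyGetD cs i ' ').toNat : Int)
                + ((PySem.List.pyGetD cs (i + 1) ' ').toNat : Int)) := by
  unfold palavras2
  rw [PySem.List.foldl_append_singleton_eq_map]
  simp

theorem palavra3_eq (cs : List Char) :
    palavra3 cs = (PySem.List.pyRange 0 ((cs.length : Int) - 2) 1).map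
      (fun i => ((PySem.List.pyGetD cs i ' ').toNat : Int)
                + ((PySem.List.pyGetD cs (i + 1) ' ').toNat : Int)
                + ((PySem.List.pyGetD cs (i + 2) ' ').toNat : Int)) := by
  unfold palavra3
  rw [PySem.List.foldl_append_singleton_eq_map]
  simp

theorem palavras2_length (cs : List Char) :
    (palavras2 cs).length = ((cs.length : Int) - 1).toNat := by
  rw [palavras2_eq, List.length_map, PySem.List.length_pyRange_one]
  simp

theorem palavra3_length (cs : List Char) :
    (palavra3 cs).length = ((cs.length : Int) - 2).toNat := by
  rw [palavra3_eq, List.length_map, PySem.List.length_pyRange_one]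
  simp

theorem char_ord_inj : Function.Injective (fun c : Char => (c.toNat : Int)) := by
  intro a b h
  have h' : (a.toNat : Int) = (b.toNat : Int) := h
  exact Char.ext (UInt32.toNat_inj.mp (by exact_mod_cast h'))

-- ===== VERDICT (by name: the statement is the Claim_ definition above) =====
theorem anagramas_spec : Claim_equal_anagramas := by
  intro s _
  unfold Spec_anagramas anagramas anagramas_alt
  simp only []
  rw [loopA_gen (palavra1 s.toList) ' ' _ 0 (by rw [palavra1_eq]; simp)]
  rw [loopA_gen (palavras2 s.toList) 0 _ _ (by rw [palavras2_length])]
  rw [loopA_gen (palavra3 s.toList) 0 _ _ (by rw [palavra3_length])]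
  rw [sweepB_sorted_eq_pc, sweepB_sorted_eq_pc, sweepB_sorted_eq_pc]
  rw [palavra1_eq, ← palavras2_eq, ← palavra3_eq]
  rw [pc_map_inj _ char_ord_inj]
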